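-- pv_equiv track=rewrite | github.com/DBarr3/AETHER-PROTOCOL-P | api_server.py | _get_folder_icon
-- ===== SOURCE A (Python) =====
-- def _get_folder_icon(name: str) -> str:
--     """Return emoji icon based on folder name."""
--     n = name.lower()
--     if any(k in n for k in ("patent", "legal", "law")):
--         return "📋"
--     if any(k in n for k in ("code", "src", "dev", "github", "project", "aether")):
--         return "💻"
--     if any(k in n for k in ("trad", "finance", "invest", "stock", "market")):
--         return "📈"
--     if any(k in n for k in ("security", "secure", "key", "vault", "crypto")):
--         return "🛡"
--     if any(k in n for k in ("backup", "archive", "old", "bak")):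
--         return "💾"
--     if any(k in n for k in ("photo", "image", "picture", "media", "video")):
--         return "🖼"
--     if any(k in n for k in ("doc", "document", "report", "note")):
--         return "📝"
--     if any(k in n for k in ("download", "dl")):
--         return "📥"
--     if "desktop" in n:
--         return "🖥"
--     return "📁"
-- ===== SOURCE B (Python) =====
-- # B: flatten the keyword groups into one keyword -> (priority, icon) table,
-- # collect every keyword occurring in the lowercased name, and return the
-- # icon of minimum priority (no ordered if-chain, no short-circuiting).
-- _KEYWORD_TABLE = [
--     ("patent", 0, "\U0001F4CB"), ("legal", 0, "\U0001F4CB"), ("law", 0, "\U0001F4CB"),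
--     ("code", 1, "\U0001F4BB"), ("src", 1, "\U0001F4BB"), ("dev", 1, "\U0001F4BB"),
--     ("github", 1, "\U0001F4BB"), ("project", 1, "\U0001F4BB"), ("aether", 1, "\U0001F4BB"),
--     ("trad", 2, "\U0001F4C8"), ("finance", 2, "\U0001F4C8"), ("invest", 2, "\U0001F4C8"),
--     ("stock", 2, "\U0001F4C8"), ("market", 2, "\U0001F4C8"),
--     ("security", 3, "\U0001F6E1"), ("secure", 3, "\U0001F6E1"), ("key", 3, "\U0001F6E1"),
--     ("vault", 3, "\U0001F6E1"), ("crypto", 3, "\U0001F6E1"),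
--     ("backup", 4, "\U0001F4BE"), ("archive", 4, "\U0001F4BE"), ("old", 4, "\U0001F4BE"),
--     ("bak", 4, "\U0001F4BE"),
--     ("photo", 5, "\U0001F5BC"), ("image", 5, "\U0001F5BC"), ("picture", 5, "\U0001F5BC"),
--     ("media", 5, "\U0001F5BC"), ("video", 5, "\U0001F5BC"),
--     ("doc", 6, "\U0001F4DD"), ("document", 6, "\U0001F4DD"), ("report", 6, "\U0001F4DD"),
--     ("note", 6, "\U0001F4DD"),
--     ("download", 7, "\U0001F4E5"), ("dl", 7, "\U0001F4E5"),
--     ("desktop", 8, "\U0001F5A5"),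
-- ]
--
--
-- def _get_folder_icon(name: str) -> str:
--     """Return emoji icon based on folder name."""
--     n = name.lower()
--     matches = [(rank, icon) for kw, rank, icon in _KEYWORD_TABLE if kw in n]
--     if not matches:
--         return "\U0001F4C1"
--     return min(matches, key=lambda m: m[0])[1]
-- ===== Notes on version B (the rewrite author's own statement) =====
-- stated objective: alternative
-- what changed: B flattens the nine keyword groups into one keyword->(priority, icon) table, collects every keyword that occurs in the lowercased name, and returns the icon of minimum priority, instead of short-circuiting through an ordered if-chain of group membership tests.
import Mathlib
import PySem

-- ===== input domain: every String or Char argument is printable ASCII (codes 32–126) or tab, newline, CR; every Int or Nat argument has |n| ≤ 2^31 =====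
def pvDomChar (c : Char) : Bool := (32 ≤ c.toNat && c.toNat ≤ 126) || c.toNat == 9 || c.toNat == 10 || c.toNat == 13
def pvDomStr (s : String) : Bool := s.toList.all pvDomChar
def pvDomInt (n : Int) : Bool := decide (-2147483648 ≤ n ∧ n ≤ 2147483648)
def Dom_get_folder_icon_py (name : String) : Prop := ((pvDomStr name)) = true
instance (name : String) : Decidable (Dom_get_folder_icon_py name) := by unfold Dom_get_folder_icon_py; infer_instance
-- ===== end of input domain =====

-- B flattens the keyword groups into one keyword->(priority, icon) table, collects every
-- keyword occurring in the lowercased name and returns the icon of minimum priority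
-- (alternative algorithm; same behaviour).

-- ===== PORT A =====
def get_folder_icon_py (name : String) : String :=
  let n := PySem.Str.lower name
  if ["patent", "legal", "law"].any (fun k => PySem.Str.isIn k n) then "📋"
  else if ["code", "src", "dev", "github", "project", "aether"].any (fun k => PySem.Str.isIn k n) then "💻"
  else if ["trad", "finance", "invest", "stock", "market"].any (fun k => PySem.Str.isIn k n) then "📈"
  else if ["security", "secure", "key", "vault", "crypto"].any (fun k => PySem.Str.isIn k n) then "🛡"
  else if ["backup", "archive", "old", "bak"].any (fun k => PySem.Str.isIn k n) then "💾"
  else if ["photo", "image", "picture", "media", "video"].any (fun k => PySem.Str.isIn k n) then "🖼"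
  else if ["doc", "document", "report", "note"].any (fun k => PySem.Str.isIn k n) then "📝"
  else if ["download", "dl"].any (fun k => PySem.Str.isIn k n) then "📥"
  else if PySem.Str.isIn "desktop" n then "🖥"
  else "📁"

-- ===== PORT B =====
def pvKwTable : List (String × Nat × String) :=
  [ ("patent", 0, "📋"), ("legal", 0, "📋"), ("law", 0, "📋"),
    ("code", 1, "💻"), ("src", 1, "💻"), ("dev", 1, "💻"),
    ("github", 1, "💻"), ("project", 1, "💻"), ("aether", 1, "💻"),
    ("trad", 2, "📈"), ("finance", 2, "📈"), ("invest", 2, "📈"),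
    ("stock", 2, "📈"), ("market", 2, "📈"),
    ("security", 3, "🛡"), ("secure", 3, "🛡"), ("key", 3, "🛡"),
    ("vault", 3, "🛡"), ("crypto", 3, "🛡"),
    ("backup", 4, "💾"), ("archive", 4, "💾"), ("old", 4, "💾"), ("bak", 4, "💾"),
    ("photo", 5, "🖼"), ("image", 5, "🖼"), ("picture", 5, "🖼"),
    ("media", 5, "🖼"), ("video", 5, "🖼"),
    ("doc", 6, "📝"), ("document", 6, "📝"), ("report", 6, "📝"), ("note", 6, "📝"),
    ("download", 7, "📥"), ("dl", 7, "📥"),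
    ("desktop", 8, "🖥") ]

-- min(matches, key=lambda m: m[0]) keeps the FIRST minimal element: fold with strict <.
def get_folder_icon_py_alt (name : String) : String :=
  let n := PySem.Str.lower name
  let ms := (pvKwTable.filter (fun t => PySem.Str.isIn t.1 n)).map (fun t => t.2)
  match ms with
  | [] => "📁"
  | m :: rest => (rest.foldl (fun a b => if b.1 < a.1 then b else a) m).2

-- ===== PRECONDITION & SPEC =====
def Spec_get_folder_icon_py (name : String) (out : String) : Prop := out = get_folder_icon_py_alt name
instance (name : String) (out : String) : Decidable (Spec_get_folder_icon_py name out) := by unfold Spec_get_folder_icon_py; infer_instance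

-- ===== CLAIM (what is proved, stated in full; the proofs are below) =====
def Claim_equal_get_folder_icon_py : Prop := ∀ (name : String), Dom_get_folder_icon_py name → Spec_get_folder_icon_py name (get_folder_icon_py name)

-- ===== LEMMAS AND PROOFS =====

-- the min-fold starting from an element strictly below everything else returns that element
theorem pv_foldl_min_fixed (l : List (Nat × String)) (a : Nat × String)
    (h : ∀ b ∈ l, a.1 ≤ b.1) :
    l.foldl (fun a b => if b.1 < a.1 then b else a) a = a := by
  induction l with
  | nil => rfl
  | cons b l ih =>
      have hb : a.1 ≤ b.1 := h b (List.mem_cons_self ..)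
      have : ¬ b.1 < a.1 := by omega
      simp only [List.foldl_cons, if_neg this]
      exact ih (fun c hc => h c (List.mem_cons_of_mem _ hc))

-- first-match reading of a rank-sorted table (proof-only helper)
def pvFirstMatch (n : String) : List (String × Nat × String) → String
  | [] => "📁"
  | (k, _, i) :: rest => if PySem.Str.isIn k n then i else pvFirstMatch n rest

-- on a table whose ranks strictly increase, the min-of-matches computation is the first match
theorem pv_min_eq_first (n : String) (tbl : List (String × Nat × String))
    (h : tbl.Pairwise (fun x y => x.2.1 ≤ y.2.1)) :
    (match (tbl.filter (fun t => PySem.Str.isIn t.1 n)).map (fun t => t.2) with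
      | [] => "📁"
      | m :: rest => (rest.foldl (fun a b => if b.1 < a.1 then b else a) m).2)
      = pvFirstMatch n tbl := by
  induction tbl with
  | nil => rfl
  | cons t rest ih =>
      obtain ⟨k, r, i⟩ := t
      rw [List.pairwise_cons] at h
      by_cases hk : PySem.Str.isIn k n
      · simp only [List.filter_cons, hk, if_pos, List.map_cons, pvFirstMatch]
        have : ∀ b ∈ (rest.filter (fun t => PySem.Str.isIn t.1 n)).map
            (fun t => t.2), ((r : Nat), i).1 ≤ b.1 := by
          intro b hb
          simp only [List.mem_map, List.mem_filter] at hb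
          obtain ⟨t, ⟨ht, _⟩, rfl⟩ := hb
          exact h.1 t ht
        rw [pv_foldl_min_fixed _ _ this]
      · simp only [List.filter_cons, hk, Bool.false_eq_true, if_false, pvFirstMatch]
        exact ih h.2

-- fold two consecutive branches with the same result into a disjunction
theorem pv_if_or (a b : Bool) (x y : String) :
    (if a = true then x else if b = true then x else y)
      = (if (a || b) = true then x else y) := by
  cases a <;> simp

-- ===== VERDICT (by name: the statement is the Claim_ definition above) =====
theorem get_folder_icon_py_spec : Claim_equal_get_folder_icon_py := by
  intro name _
  unfold Spec_get_folder_icon_py get_folder_icon_py get_folder_icon_py_alt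
  have hp : pvKwTable.Pairwise (fun x y => x.2.1 ≤ y.2.1) := by decide
  rw [pv_min_eq_first (PySem.Str.lower name) pvKwTable hp]
  simp only [pvKwTable, pvFirstMatch, List.any_cons, List.any_nil, Bool.or_false, pv_if_or]
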